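-- pv_equiv track=rewrite | github.com/Arsen1302/Code-copy-detector | TestData/solutions/problem_1375_2.py | solution_1375_2
-- ===== SOURCE A (Python) =====
-- from typing import List
--
-- def solution_1375_2(a: List[int]) -> int:
--     temp,temp2=a[0],a[-1]
--     left=([a[0]]+[0]*(len(a)-1))
--     right=[0]*(len(a)-1) + [a[-1]]
--     for i in range(1,len(a)):
--         left[i]=max(a[i-1],temp)
--         temp=left[i]
--     for i in range(len(a)-2,-1,-1):
--         right[i]=min(a[i+1],temp2)
--         temp2=right[i]
--     res=0
--     for i in range(1,len(a)-1):
--         if(a[i]>left[i] and a[i]<right[i]):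
--             res+=2
--         elif(a[i]>a[i-1] and a[i]<a[i+1]):
--             res+=1
--     return res
-- ===== SOURCE B (Python) =====
-- from typing import List
--
-- def solution_1375_2(a: List[int]) -> int:
--     n = len(a)
--     if n < 3:
--         return 0
--     # One forward monotonic-stack pass: after the loop, stack holds exactly the
--     # indices whose element is strictly greater than everything before it and
--     # strictly less than everything after it (the "partition" indices).
--     stack = []
--     pmax = a[0]
--     for i in range(1, n):
--         x = a[i]
--         while stack and a[stack[-1]] >= x:
--             stack.pop()
--         if x > pmax:
--             stack.append(i)
--             pmax = x
--     pivots = set(stack)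
--     res = 0
--     for i in range(1, n - 1):
--         if i in pivots:
--             res += 2
--         elif a[i - 1] < a[i] < a[i + 1]:
--             res += 1
--     return res
-- ===== Notes on version B (the rewrite author's own statement) =====
-- stated objective: alternative
-- what changed: B abandons A's prefix-max/suffix-min table construction entirely: a single forward monotonic-stack pass (pop while the top's value >= current, push prefix-max records) leaves on the stack exactly the indices that are greater than everything before and less than everything after, and the result loop then checks stack membership instead of two table lookups.
import Mathlib
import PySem

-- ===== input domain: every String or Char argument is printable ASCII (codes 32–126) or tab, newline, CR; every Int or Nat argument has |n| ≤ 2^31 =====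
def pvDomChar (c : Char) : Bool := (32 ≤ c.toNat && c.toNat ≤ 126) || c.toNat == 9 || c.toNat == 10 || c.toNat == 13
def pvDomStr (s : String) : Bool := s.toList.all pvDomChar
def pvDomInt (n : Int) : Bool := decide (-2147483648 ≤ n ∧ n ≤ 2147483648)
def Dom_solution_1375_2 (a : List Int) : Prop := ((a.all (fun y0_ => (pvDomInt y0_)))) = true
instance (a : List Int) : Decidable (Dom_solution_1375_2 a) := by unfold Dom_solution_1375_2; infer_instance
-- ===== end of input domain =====

-- B replaces A's prefix-max/suffix-min table algorithm by a single forward monotonic-stack pass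
-- whose final stack holds exactly the "partition" indices (greater than all before, less than all
-- after); no table is built (objective: alternative; a timing run measured B faster).

-- ===== PORT A =====
-- Indices are read with pyGetD (default 0): under Pre_ (a ≠ []) every index A reads or
-- writes is in range, so the default is never used; the empty list, where Python's first
-- element access raises IndexError, is excluded by Pre_solution_1375_2.
def solution_1375_2 (a : List Int) : Int :=
  let n : Int := PySem.List.len a
  let temp : Int := PySem.List.pyGetD a 0 0                 -- temp = a[0]
  let temp2 : Int := PySem.List.pyGetD a (-1) 0             -- temp2 = a[-1]
  let left : List Int := PySem.List.pyGetD a 0 0 :: List.replicate (a.length - 1) 0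
  let right : List Int := List.replicate (a.length - 1) 0 ++ [PySem.List.pyGetD a (-1) 0]
  -- for i in range(1, len(a)): left[i] = max(a[i-1], temp); temp = left[i]
  let s1 := (PySem.List.pyRange 1 n 1).foldl
      (fun (st : List Int × Int) i =>
        (st.1.set i.toNat (max (PySem.List.pyGetD a (i - 1) 0) st.2),
         max (PySem.List.pyGetD a (i - 1) 0) st.2)) (left, temp)
  -- for i in range(len(a)-2, -1, -1): right[i] = min(a[i+1], temp2); temp2 = right[i]
  let s2 := (PySem.List.pyRange (n - 2) (-1) (-1)).foldl
      (fun (st : List Int × Int) i =>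
        (st.1.set i.toNat (min (PySem.List.pyGetD a (i + 1) 0) st.2),
         min (PySem.List.pyGetD a (i + 1) 0) st.2)) (right, temp2)
  -- for i in range(1, len(a)-1): res += 2 / 1 / 0
  (PySem.List.pyRange 1 (n - 1) 1).foldl
      (fun res i =>
        if PySem.List.pyGetD a i 0 > PySem.List.pyGetD s1.1 i 0 ∧
           PySem.List.pyGetD a i 0 < PySem.List.pyGetD s2.1 i 0 then res + 2
        else if PySem.List.pyGetD a i 0 > PySem.List.pyGetD a (i - 1) 0 ∧
                PySem.List.pyGetD a i 0 < PySem.List.pyGetD a (i + 1) 0 then res + 1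
        else res) 0

-- ===== PORT B =====
-- B's `while stack and a[stack[-1]] >= x: stack.pop()` loop (pop from the end of the list):
def bPop (a : List Int) (x : Int) (st : List Int) : List Int :=
  if st = [] then st
  else if x ≤ PySem.List.pyGetD a (PySem.List.pyGetD st (-1) 0) 0 then bPop a x st.dropLast
  else st
termination_by st.length
decreasing_by
  have : 0 < st.length := List.length_pos_iff.mpr (by assumption)
  simp only [List.length_dropLast]
  omega

-- Same reading convention as port A: indices read with pyGetD are in range for nonempty a.
def solution_1375_2_alt (a : List Int) : Int :=
  let n : Int := PySem.List.len a
  if n < 3 then 0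
  else
    -- one monotonic-stack pass over a[1:]
    let s := (PySem.List.pyRange 1 n 1).foldl
      (fun (st : List Int × Int) i =>
        let x := PySem.List.pyGetD a i 0
        let stk := bPop a x st.1
        if x > st.2 then (stk ++ [i], x) else (stk, st.2))
      ([], PySem.List.pyGetD a 0 0)
    let pivots : PySem.Set Int := PySem.Set.ofList s.1
    -- res accumulation
    (PySem.List.pyRange 1 (n - 1) 1).foldl
      (fun res i =>
        if PySem.Set.contains pivots i then res + 2
        else if PySem.List.pyGetD a (i - 1) 0 < PySem.List.pyGetD a i 0 ∧
                PySem.List.pyGetD a i 0 < PySem.List.pyGetD a (i + 1) 0 then res + 1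
        else res) 0

-- ===== PRECONDITION & SPEC =====
-- Pre_ excludes only the empty list, on which Python A raises IndexError at its first element access.
def Pre_solution_1375_2 (a : List Int) : Prop := a ≠ []
instance (a : List Int) : Decidable (Pre_solution_1375_2 a) := by unfold Pre_solution_1375_2; infer_instance
def pvWitness_solution_1375_2 : List Int := [3, 1, 4, 1, 5]

def Spec_solution_1375_2 (a : List Int) (out : Int) : Prop := out = solution_1375_2_alt a
instance (a : List Int) (out : Int) : Decidable (Spec_solution_1375_2 a out) := by unfold Spec_solution_1375_2; infer_instance

-- ===== CLAIM (what is proved, stated in full; the proofs are below) =====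
def Claim_equal_solution_1375_2 : Prop := ∀ (a : List Int), Dom_solution_1375_2 a → Pre_solution_1375_2 a → Spec_solution_1375_2 a (solution_1375_2 a)

-- ===== LEMMAS AND PROOFS =====

-- pmF a k = max(a[0], …, a[k-1]) for 1 ≤ k (pmF a 0 = a[0]): A's left[k], B's running pmax.
def pmF (a : List Int) : Nat → Int
  | 0 => a.headD 0
  | k + 1 => max (pmF a k) (a.getD k 0)

-- smF a k = min(a[k], …, a[n-1], a[-1]): A's right[i] is smF a (i+1).
def smF (a : List Int) (k : Nat) : Int := (a.drop k).foldr min (a.getLastD 0)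

-- candB a k j: after B's stack pass over a[1:k], index j is still on the stack
-- (j ≥ 1, a[j] beats every earlier element, and is beaten by every later element below k).
def candB (a : List Int) (k j : Nat) : Bool :=
  decide (1 ≤ j) && decide (pmF a j < a.getD j 0) &&
  ((List.range k).all fun l => !decide (j < l) || decide (a.getD j 0 < a.getD l 0))

-- stkF a k: B's stack contents after processing a[1:k].
def stkF (a : List Int) (k : Nat) : List Int :=
  ((List.range k).filter (candB a k)).map (fun j : Nat => (j : Int))

theorem pyRange_neg_succ_right (a b : Int) (h : b ≤ a) :
    PySem.List.pyRange a (b - 1) (-1) = PySem.List.pyRange a b (-1) ++ [b] := by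
  rw [PySem.List.pyRange_neg_one_eq_reverse, PySem.List.pyRange_neg_one_eq_reverse,
    show b - 1 + 1 = b by ring, PySem.List.pyRange_one_cons (by omega), List.reverse_cons]

theorem getD_last (a : List Int) (h : a ≠ []) : a.getD (a.length - 1) 0 = a.getLastD 0 := by
  have hl : 0 < a.length := List.length_pos_iff.mpr h
  rw [List.getD_eq_getElem a 0 (by omega), List.getLastD_eq_getLast?, List.getLast?_eq_getElem?,
    List.getElem?_eq_getElem (by omega)]
  rfl

theorem smF_last (a : List Int) : smF a a.length = a.getLastD 0 := by simp [smF]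

theorem smF_rec (a : List Int) (k : Nat) (h : k < a.length) :
    smF a k = min (a.getD k 0) (smF a (k + 1)) := by
  unfold smF
  rw [List.drop_eq_getElem_cons h, List.foldr_cons, List.getD_eq_getElem a 0 h]

theorem smF_pred (a : List Int) (h : a ≠ []) : smF a (a.length - 1) = a.getLastD 0 := by
  have hl : 0 < a.length := List.length_pos_iff.mpr h
  rw [smF_rec a _ (by omega), show a.length - 1 + 1 = a.length by omega, smF_last,
    getD_last a h, min_self]

theorem pyGetD_neg_one (a : List Int) (h : a ≠ []) :
    PySem.List.pyGetD a (-1) 0 = a.getLastD 0 := by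
  have hl : 1 ≤ a.length := List.length_pos_iff.mpr h
  simp only [PySem.List.pyGetD, PySem.List.pyGet?, PySem.List.pyIdx?, Int.reduceNeg,
    Int.neg_nonneg, Int.reduceLE, ↓reduceIte, neg_le_neg_iff, Nat.one_le_cast, neg_neg,
    Int.toNat_one, List.getLastD_eq_getLast?, hl]
  rw [List.getLast?_eq_getElem?]
  simp

theorem headD_eq_getD (a : List Int) : a.headD 0 = a.getD 0 0 := by
  cases a <;> simp

-- setting one cell of a tabulated list re-tabulates it
theorem set_map_range (n k : Nat) (f : Nat → Int) (v : Int) (hk : k < n) :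
    ((List.range n).map f).set k v
      = (List.range n).map (fun j => if j = k then v else f j) := by
  apply List.ext_getElem
  · simp
  · intro i h1 h2
    rw [List.getElem_set, List.getElem_map, List.getElem_map]
    rcases eq_or_ne i k with rfl | hne
    · simp
    · simp [hne, Ne.symm hne]

-- invariant of A's first (prefix-max) loop
theorem leftA_inv (a : List Int) (m : Nat) (hm : 1 ≤ m) (hmn : m ≤ a.length) :
    (PySem.List.pyRange 1 (m : Int) 1).foldl
      (fun (st : List Int × Int) i =>
        (st.1.set i.toNat (max (PySem.List.pyGetD a (i - 1) 0) st.2),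
         max (PySem.List.pyGetD a (i - 1) 0) st.2))
      (PySem.List.pyGetD a 0 0 :: List.replicate (a.length - 1) 0, PySem.List.pyGetD a 0 0)
    = ((List.range a.length).map (fun j => if j < m then pmF a j else 0), pmF a (m - 1)) := by
  induction m, hm using Nat.le_induction with
  | base =>
    rw [show ((1:Nat):Int) = 1 by norm_num, PySem.List.pyRange_one_eq_nil le_rfl]
    have hget : PySem.List.pyGetD a 0 0 = pmF a 0 := by
      simp [pmF, PySem.List.pyGetD_of_nonneg a 0 le_rfl]
      cases a <;> simp
    rw [List.foldl_nil, Prod.mk.injEq]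
    constructor
    · apply List.ext_getElem
      · simp; omega
      · intro i h1 h2
        rw [List.getElem_map, List.getElem_range]
        cases i with
        | zero => simpa using hget
        | succ i => simp
    · simpa using hget
  | succ m hm ih =>
    have h1m : (1:Int) ≤ (m:Int) := by exact_mod_cast hm
    rw [show (((m+1:Nat)):Int) = (m:Int)+1 by push_cast; ring,
      PySem.List.pyRange_one_succ_right h1m, List.foldl_append, ih (by omega), List.foldl_cons,
      List.foldl_nil]
    have hidx : (m:Int) - 1 = ((m - 1 : Nat) : Int) := by omega
    have hv : max (PySem.List.pyGetD a ((m:Int) - 1) 0) (pmF a (m - 1)) = pmF a m := by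
      rw [hidx, PySem.List.pyGetD_natCast, max_comm]
      have : m = (m - 1) + 1 := by omega
      rw [this, pmF]
      simp
    simp only [hv]
    rw [Prod.mk.injEq]
    constructor
    · rw [show ((m:Int)).toNat = m by omega, set_map_range _ _ _ _ (by omega)]
      apply List.map_congr_left
      intro j hj
      rcases eq_or_ne j m with rfl | hne
      · simp
      · rw [if_neg hne]
        split_ifs with h h' h'
        · rfl
        · omega
        · omega
        · rfl
    · congr 1

-- invariant of A's second (suffix-min) loop
theorem rightA_inv (a : List Int) (ha : a ≠ []) (m : Nat) (hmn : m ≤ a.length - 1) :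
    (PySem.List.pyRange ((a.length : Int) - 2) ((a.length : Int) - 2 - (m : Int)) (-1)).foldl
      (fun (st : List Int × Int) i =>
        (st.1.set i.toNat (min (PySem.List.pyGetD a (i + 1) 0) st.2),
         min (PySem.List.pyGetD a (i + 1) 0) st.2))
      (List.replicate (a.length - 1) 0 ++ [PySem.List.pyGetD a (-1) 0], PySem.List.pyGetD a (-1) 0)
    = ((List.range a.length).map (fun j => if a.length - 1 - m ≤ j then smF a (j + 1) else 0),
       smF a (a.length - m)) := by
  have hl : 1 ≤ a.length := List.length_pos_iff.mpr ha
  induction m with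
  | zero =>
    rw [show ((0:Nat):Int) = 0 by norm_num, sub_zero, PySem.List.pyRange_neg_one_eq_nil le_rfl,
      List.foldl_nil, Prod.mk.injEq]
    constructor
    · apply List.ext_getElem
      · simp; omega
      · intro i h1 h2
        rw [List.getElem_map, List.getElem_range]
        simp only [List.length_append, List.length_replicate, List.length_cons,
          List.length_nil] at h1
        rcases lt_or_ge i (a.length - 1) with hi | hi
        · rw [List.getElem_append_left (by simpa using hi), List.getElem_replicate,
            if_neg (by omega)]
        · have hieq : i = a.length - 1 := by omega
          rw [List.getElem_append_right (by simpa using hi), if_pos (by omega)]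
          simp only [List.getElem_singleton]
          rw [pyGetD_neg_one a ha, show i + 1 = a.length by omega, smF_last]
    · rw [Nat.sub_zero, smF_last, pyGetD_neg_one a ha]
  | succ m ih =>
    have hb : ((a.length : Int) - 2 - ((m+1 : Nat) : Int))
        = ((a.length : Int) - 2 - (m : Int)) - 1 := by push_cast; ring
    rw [hb, pyRange_neg_succ_right _ _ (by omega), List.foldl_append, ih (by omega),
      List.foldl_cons, List.foldl_nil]
    have hcast : (a.length : Int) - 2 - (m : Int) = ((a.length - 2 - m : Nat) : Int) := by omega
    have hv : min (PySem.List.pyGetD a ((a.length : Int) - 2 - (m : Int) + 1) 0)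
        (smF a (a.length - m)) = smF a (a.length - (m + 1)) := by
      rw [show (a.length : Int) - 2 - (m : Int) + 1 = ((a.length - 1 - m : Nat) : Int) by omega,
        PySem.List.pyGetD_natCast,
        show a.length - (m+1) = a.length - 1 - m by omega,
        smF_rec a (a.length - 1 - m) (by omega),
        show a.length - 1 - m + 1 = a.length - m by omega]
    rw [hv, hcast, Prod.mk.injEq]
    constructor
    · rw [Int.toNat_natCast, set_map_range _ _ _ _ (by omega)]
      apply List.map_congr_left
      intro j hj
      rw [List.mem_range] at hj
      rcases eq_or_ne j (a.length - 2 - m) with rfl | hne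
      · rw [if_pos rfl, if_pos (by omega), show a.length - 2 - m + 1 = a.length - (m+1) by omega]
      · rw [if_neg hne]
        split_ifs with h h' h'
        · rfl
        · omega
        · omega
        · rfl
    · rfl

-- ======== B-side lemmas ========

theorem pmF_ge (a : List Int) (k j : Nat) (h : j < k) : a.getD j 0 ≤ pmF a k := by
  induction k with
  | zero => omega
  | succ k ih =>
    rcases eq_or_ne j k with rfl | hne
    · exact le_max_right _ _
    · exact le_trans (ih (by omega)) (le_max_left _ _)

theorem candB_iff (a : List Int) (k j : Nat) :
    candB a k j = true ↔
      1 ≤ j ∧ pmF a j < a.getD j 0 ∧ ∀ l, l < k → j < l → a.getD j 0 < a.getD l 0 := by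
  simp only [candB, Bool.and_eq_true, decide_eq_true_eq, List.all_eq_true, List.mem_range,
    Bool.or_eq_true, Bool.not_eq_true', decide_eq_false_iff_not, Nat.not_lt]
  constructor
  · rintro ⟨⟨h1, h2⟩, h3⟩
    exact ⟨h1, h2, fun l hl hjl => ((h3 l hl).resolve_left (by omega))⟩
  · rintro ⟨h1, h2, h3⟩
    refine ⟨⟨h1, h2⟩, fun l hl => ?_⟩
    by_cases hjl : j < l
    · exact Or.inr (h3 l hl hjl)
    · exact Or.inl (by omega)

theorem bPop_nil (a : List Int) (x : Int) : bPop a x [] = [] := by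
  rw [bPop]
  simp

theorem bPop_concat (a : List Int) (x : Int) (st : List Int) (j : Int) :
    bPop a x (st ++ [j])
      = if x ≤ PySem.List.pyGetD a j 0 then bPop a x st else st ++ [j] := by
  rw [bPop]
  rw [if_neg (show ¬ st ++ [j] = [] by simp), PySem.List.pyGetD_neg_one_append_singleton,
    List.dropLast_concat]

-- on a stack whose stored values increase, the pop-from-the-end loop is a filter
theorem bPop_eq_filter (a : List Int) (x : Int) (st : List Int)
    (hmono : st.Pairwise (fun p q => PySem.List.pyGetD a p 0 < PySem.List.pyGetD a q 0)) :
    bPop a x st = st.filter (fun j => decide (PySem.List.pyGetD a j 0 < x)) := by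
  induction st using List.reverseRecOn with
  | nil => rw [bPop_nil]; rfl
  | append_singleton st j ih =>
    rw [List.pairwise_append] at hmono
    obtain ⟨h1, -, h3⟩ := hmono
    rw [bPop_concat, List.filter_append]
    by_cases hx : x ≤ PySem.List.pyGetD a j 0
    · rw [if_pos hx, ih h1]
      have hd : decide (PySem.List.pyGetD a j 0 < x) = false := by
        simp only [decide_eq_false_iff_not, not_lt]; exact hx
      simp [hd]
    · rw [if_neg hx]
      rw [not_le] at hx
      have hst : List.filter (fun p => decide (PySem.List.pyGetD a p 0 < x)) st = st :=
        List.filter_eq_self.mpr (fun p hp => by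
          have := h3 p hp j (by simp)
          simp only [decide_eq_true_eq]
          omega)
      have hj1 : List.filter (fun p => decide (PySem.List.pyGetD a p 0 < x)) [j] = [j] := by
        simp [hx]
      rw [hst, hj1]

theorem stkF_pairwise (a : List Int) (k : Nat) :
    (stkF a k).Pairwise (fun p q => PySem.List.pyGetD a p 0 < PySem.List.pyGetD a q 0) := by
  unfold stkF
  rw [List.pairwise_map, List.pairwise_filter]
  apply List.Pairwise.imp ?_ (List.pairwise_lt_range)
  intro p q hpq hp hq
  rw [candB_iff] at hq
  have h1 : a.getD p 0 ≤ pmF a q := pmF_ge a q p hpq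
  have h2 : pmF a q < a.getD q 0 := hq.2.1
  rw [PySem.List.pyGetD_natCast, PySem.List.pyGetD_natCast]
  omega

theorem candB_succ (a : List Int) (k j : Nat) (hj : j < k) :
    candB a (k + 1) j = (candB a k j && decide (a.getD j 0 < a.getD k 0)) := by
  apply Bool.eq_iff_iff.mpr
  rw [Bool.and_eq_true, candB_iff, candB_iff, decide_eq_true_eq]
  constructor
  · rintro ⟨h1, hpm, hall⟩
    exact ⟨⟨h1, hpm, fun l hl hjl => hall l (by omega) hjl⟩, hall k (by omega) hj⟩
  · rintro ⟨⟨h1, hpm, hall⟩, hlt⟩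
    refine ⟨h1, hpm, fun l hl hjl => ?_⟩
    rcases eq_or_ne l k with rfl | hne
    · exact hlt
    · exact hall l (by omega) hjl

theorem bPop_stkF (a : List Int) (k : Nat) :
    bPop a (a.getD k 0) (stkF a k)
      = ((List.range k).filter (candB a (k + 1))).map (fun j : Nat => (j : Int)) := by
  rw [bPop_eq_filter _ _ _ (stkF_pairwise a k)]
  unfold stkF
  rw [List.filter_map, List.filter_filter]
  congr 1
  apply List.filter_congr
  intro j hj
  rw [List.mem_range] at hj
  simp only [Function.comp, PySem.List.pyGetD_natCast]
  rw [Bool.and_comm]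
  exact (candB_succ a k j hj).symm

theorem candB_self (a : List Int) (k : Nat) (h1 : 1 ≤ k) :
    candB a (k + 1) k = decide (pmF a k < a.getD k 0) := by
  apply Bool.eq_iff_iff.mpr
  rw [candB_iff, decide_eq_true_eq]
  exact ⟨fun h => h.2.1, fun h => ⟨h1, h, fun l hl hkl => by omega⟩⟩

-- invariant of B's monotonic-stack pass
theorem stkB_inv (a : List Int) (k : Nat) (h1 : 1 ≤ k) :
    (PySem.List.pyRange 1 (k : Int) 1).foldl
      (fun (st : List Int × Int) i =>
        if PySem.List.pyGetD a i 0 > st.2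
        then (bPop a (PySem.List.pyGetD a i 0) st.1 ++ [i], PySem.List.pyGetD a i 0)
        else (bPop a (PySem.List.pyGetD a i 0) st.1, st.2))
      ([], PySem.List.pyGetD a 0 0)
    = (stkF a k, pmF a k) := by
  induction k, h1 using Nat.le_induction with
  | base =>
    rw [show ((1:Nat):Int) = 1 by norm_num, PySem.List.pyRange_one_eq_nil le_rfl, List.foldl_nil]
    have hs : stkF a 1 = [] := by
      unfold stkF
      simp [List.filter, candB]
    have hp : pmF a 1 = a.getD 0 0 := by
      rw [show pmF a 1 = max (pmF a 0) (a.getD 0 0) from rfl,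
        show pmF a 0 = a.headD 0 from rfl, headD_eq_getD, max_self]
    rw [hs, hp, PySem.List.pyGetD_zero]
  | succ k hk ih =>
    have h1k : (1:Int) ≤ (k:Int) := by exact_mod_cast hk
    rw [show (((k+1:Nat)):Int) = (k:Int)+1 by push_cast; ring,
      PySem.List.pyRange_one_succ_right h1k, List.foldl_append, ih, List.foldl_cons,
      List.foldl_nil]
    simp only [PySem.List.pyGetD_natCast]
    rw [bPop_stkF a k]
    have hstep : stkF a (k + 1)
        = ((List.range k).filter (candB a (k + 1))).map (fun j : Nat => (j : Int))
          ++ (if candB a (k + 1) k then [(k:Int)] else []) := by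
      unfold stkF
      rw [List.range_succ, List.filter_append, List.map_append]
      congr 1
      by_cases hc : candB a (k + 1) k <;> simp [List.filter, hc]
    by_cases hx : a.getD k 0 > pmF a k
    · rw [if_pos hx, hstep, candB_self a k hk, if_pos (by simpa using hx), Prod.mk.injEq]
      refine ⟨rfl, ?_⟩
      show a.getD k 0 = max (pmF a k) (a.getD k 0)
      omega
    · rw [if_neg hx, hstep, candB_self a k hk, if_neg (by simpa using hx), List.append_nil,
        Prod.mk.injEq]
      refine ⟨rfl, ?_⟩
      show pmF a k = max (pmF a k) (a.getD k 0)
      omega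

theorem mem_stkF_natCast (a : List Int) (n m : Nat) (hm : m < n) :
    ((m:Int) ∈ stkF a n) ↔ candB a n m = true := by
  unfold stkF
  simp only [List.mem_map, List.mem_filter, List.mem_range]
  constructor
  · rintro ⟨j, ⟨hj, hc⟩, he⟩
    have : j = m := by exact_mod_cast he
    exact this ▸ hc
  · intro hc
    exact ⟨m, ⟨hm, hc⟩, rfl⟩

theorem lt_smF_aux (a : List Int) (ha : a ≠ []) (x : Int) :
    ∀ d : Nat, d ≤ a.length - 1 →
      (x < smF a (a.length - 1 - d) ↔
        ∀ l, a.length - 1 - d ≤ l → l < a.length → x < a.getD l 0) := by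
  have hl : 1 ≤ a.length := List.length_pos_iff.mpr ha
  intro d
  induction d with
  | zero =>
    intro _
    rw [Nat.sub_zero, smF_pred a ha]
    constructor
    · intro h l hl1 hl2
      have : l = a.length - 1 := by omega
      subst this
      rwa [getD_last a ha]
    · intro h
      rw [← getD_last a ha]
      exact h (a.length - 1) le_rfl (by omega)
  | succ d ih =>
    intro hd
    have hk : a.length - 1 - (d + 1) = a.length - 2 - d := by omega
    rw [hk, smF_rec a (a.length - 2 - d) (by omega),
      show a.length - 2 - d + 1 = a.length - 1 - d by omega, lt_min_iff, ih (by omega)]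
    constructor
    · rintro ⟨h1, h2⟩ l hl1 hl2
      rcases eq_or_ne l (a.length - 2 - d) with rfl | hne
      · exact h1
      · exact h2 l (by omega) hl2
    · intro h
      exact ⟨h _ le_rfl (by omega), fun l hl1 hl2 => h l (by omega) hl2⟩

theorem lt_smF_iff (a : List Int) (ha : a ≠ []) (x : Int) (k : Nat) (hk : k ≤ a.length - 1) :
    x < smF a k ↔ ∀ l, k ≤ l → l < a.length → x < a.getD l 0 := by
  have := lt_smF_aux a ha x (a.length - 1 - k) (by omega)
  rwa [show a.length - 1 - (a.length - 1 - k) = k by omega] at this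

-- the pivot condition of B's stack coincides with A's table condition
theorem cond_iff (a : List Int) (ha : a ≠ []) (m : Nat) (h1 : 1 ≤ m) (h2 : m < a.length - 1) :
    candB a a.length m = true ↔ (pmF a m < a.getD m 0 ∧ a.getD m 0 < smF a (m + 1)) := by
  rw [candB_iff, lt_smF_iff a ha _ (m + 1) (by omega)]
  constructor
  · rintro ⟨-, hpm, hall⟩
    exact ⟨hpm, fun l hl1 hl2 => hall l hl2 (by omega)⟩
  · rintro ⟨hpm, hsm⟩
    exact ⟨h1, hpm, fun l hl hml => hsm l (by omega) hl⟩

-- ===== VERDICT (by name: the statement is the Claim_ definition above) =====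
theorem solution_1375_2_spec : Claim_equal_solution_1375_2 := by
  intro a _ hpre
  unfold Spec_solution_1375_2
  have hl : 1 ≤ a.length := List.length_pos_iff.mpr hpre
  simp only [solution_1375_2, solution_1375_2_alt, PySem.List.len_eq]
  by_cases h3 : a.length < 3
  · rw [if_pos (by exact_mod_cast h3),
      PySem.List.pyRange_one_eq_nil (show (a.length : Int) - 1 ≤ 1 by omega), List.foldl_nil]
  · rw [if_neg (by exact_mod_cast h3)]
    have hL := leftA_inv a a.length hl le_rfl
    have hRA := rightA_inv a hpre (a.length - 1) le_rfl
    rw [show ((a.length : Int) - 2 - ((a.length - 1 : Nat) : Int)) = -1 by omega] at hRA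
    simp only [hL, hRA, stkB_inv a a.length hl]
    apply PySem.List.foldl_congr_mem
    intro acc i hi
    rw [PySem.List.mem_pyRange_one] at hi
    obtain ⟨m, rfl⟩ : ∃ m : Nat, i = (m : Int) := ⟨i.toNat, by omega⟩
    have hm1 : 1 ≤ m := by omega
    have hm2 : m < a.length - 1 := by omega
    have hidx1 : (m : Int) - 1 = ((m - 1 : Nat) : Int) := by omega
    have hidx2 : (m : Int) + 1 = ((m + 1 : Nat) : Int) := by push_cast; ring
    rw [hidx1, hidx2]
    simp only [PySem.List.pyGetD_natCast,
      PySem.List.getD_map_range _ _ _ _ (show m < a.length by omega),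
      if_pos (show m < a.length by omega), if_pos (show a.length - 1 - (a.length - 1) ≤ m by omega)]
    have hmem : PySem.Set.contains (PySem.Set.ofList (stkF a a.length)) ((m:Int)) = true ↔
        (pmF a m < a.getD m 0 ∧ a.getD m 0 < smF a (m + 1)) := by
      rw [PySem.Set.contains_iff, PySem.Set.mem_ofList,
        mem_stkF_natCast a a.length m (by omega), cond_iff a hpre m hm1 hm2]
    by_cases hc : pmF a m < a.getD m 0 ∧ a.getD m 0 < smF a (m + 1)
    · rw [if_pos (show a.getD m 0 > pmF a m ∧ a.getD m 0 < smF a (m+1) from hc),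
        if_pos (hmem.mpr hc)]
    · rw [if_neg (show ¬(a.getD m 0 > pmF a m ∧ a.getD m 0 < smF a (m+1)) from hc),
        if_neg (fun h => hc (hmem.mp h))]
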